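-- pv_equiv track=rewrite | github.com/MoisesFernan0920/Data-Eng | Coding_Assessment_Practice/get_session_count_Version3.py | getSessionCount
-- ===== SOURCE A (Python) =====
-- def getSessionCount(timeout, userIds, timestamps):
--     """
--     Returns the total number of sessions across all users.
--     A session for a user is a contiguous sequence of events such that
--     no two consecutive events are separated by more than `timeout` seconds.
--     """
--     # Step 1: Group events by user
--     user_events = {}
--     for uid, ts in zip(userIds, timestamps):
--         user_events.setdefault(uid, []).append(ts)
--
--     total_sessions = 0
--     # Step 2: For each user, sort timestamps and count sessions
--     for times in user_events.values():
--         times.sort()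
--         if not times:
--             continue
--         sessions = 1
--         for prev, curr in zip(times, times[1:]):
--             if curr - prev > timeout:
--                 sessions += 1
--         total_sessions += sessions
--     return total_sessions
-- ===== SOURCE B (Python) =====
-- def getSessionCount(timeout, userIds, timestamps):
--     """One global sort by timestamp, then a single sweep with a last-seen map."""
--     total = 0
--     last_seen = {}
--     for uid, ts in sorted(zip(userIds, timestamps), key=lambda e: e[1]):
--         if uid not in last_seen or ts - last_seen[uid] > timeout:
--             total += 1
--         last_seen[uid] = ts
--     return total
-- ===== Notes on version B (the rewrite author's own statement) =====
-- stated objective: alternative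
-- what changed: Replaces group-by-user-then-sort-each-group with one global sort of (uid,ts) events by timestamp and a single sweep maintaining a last-seen timestamp per user.
import Mathlib
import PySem

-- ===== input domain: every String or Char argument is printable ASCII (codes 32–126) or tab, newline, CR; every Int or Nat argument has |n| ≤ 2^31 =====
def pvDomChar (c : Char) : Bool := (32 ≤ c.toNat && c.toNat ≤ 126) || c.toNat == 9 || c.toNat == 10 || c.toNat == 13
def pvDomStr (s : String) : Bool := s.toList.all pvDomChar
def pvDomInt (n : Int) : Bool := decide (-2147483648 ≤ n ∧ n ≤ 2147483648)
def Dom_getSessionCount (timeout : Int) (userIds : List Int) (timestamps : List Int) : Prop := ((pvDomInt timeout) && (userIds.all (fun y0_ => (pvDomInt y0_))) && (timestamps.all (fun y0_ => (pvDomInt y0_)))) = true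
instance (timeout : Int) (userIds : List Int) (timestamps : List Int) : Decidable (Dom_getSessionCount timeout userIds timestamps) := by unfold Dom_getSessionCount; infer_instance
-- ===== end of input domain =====

-- B replaces A's group-by-user-then-sort-each-group by one global sort of (uid,ts) pairs
-- by timestamp plus a single sweep with a last-seen map (alternative decomposition, same cost).


-- ===== PORT A =====
-- user_events.setdefault(uid, []).append(ts) is the grouping loop d.modify uid [] (· ++ [ts]);
-- times[1:] is PySem.List.slice times (some 1) none; values() iterates in key-insertion order.
def getSessionCount (timeout : Int) (userIds : List Int) (timestamps : List Int) : Int :=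
  let user_events :=
    (userIds.zip timestamps).foldl
      (fun d p => d.modify p.1 [] (· ++ [p.2]))
      (PySem.Dict.empty : PySem.Dict Int (List Int))
  user_events.values.foldl
    (fun total_sessions times =>
      let times := PySem.List.sorted times (fun x => x) false
      if times = [] then total_sessions
      else
        total_sessions +
          (times.zip (PySem.List.slice times (some 1) none)).foldl
            (fun sessions pc => if pc.2 - pc.1 > timeout then sessions + 1 else sessions) 1)
    0

-- ===== PORT B =====
-- one global stable sort by timestamp, then a sweep carrying (total, last_seen dict)
def getSessionCount_alt (timeout : Int) (userIds : List Int) (timestamps : List Int) : Int :=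
  let evs := PySem.List.sorted (userIds.zip timestamps) (fun e => e.2) false
  (evs.foldl
    (fun st e =>
      (match st.2.get? e.1 with
        | none => st.1 + 1
        | some p => if e.2 - p > timeout then st.1 + 1 else st.1,
       st.2.insert e.1 e.2))
    ((0 : Int), (PySem.Dict.empty : PySem.Dict Int Int))).1

-- ===== PRECONDITION & SPEC =====
def Spec_getSessionCount (timeout : Int) (userIds : List Int) (timestamps : List Int) (out : Int) : Prop := out = getSessionCount_alt timeout userIds timestamps
instance (timeout : Int) (userIds : List Int) (timestamps : List Int) (out : Int) : Decidable (Spec_getSessionCount timeout userIds timestamps out) := by unfold Spec_getSessionCount; infer_instance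

-- ===== CLAIM (what is proved, stated in full; the proofs are below) =====
def Claim_equal_getSessionCount : Prop := ∀ (timeout : Int) (userIds : List Int) (timestamps : List Int), Dom_getSessionCount timeout userIds timestamps → Spec_getSessionCount timeout userIds timestamps (getSessionCount timeout userIds timestamps)

-- ===== LEMMAS AND PROOFS =====

/-- Session count of one user's (already ordered) timestamp list, given an optional previous event. -/
def pvCnt (timeout : Int) : Option Int → List Int → Int
  | _, [] => 0
  | none, t :: ts => 1 + pvCnt timeout (some t) ts
  | some p, t :: ts => (if t - p > timeout then 1 else 0) + pvCnt timeout (some t) ts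

/-- The timestamps of user `u` in event list `l`, in order. -/
def pvTs (u : Int) (l : List (Int × Int)) : List Int :=
  (l.filter (fun p => p.1 == u)).map (·.2)

lemma pvTs_nil (u : Int) : pvTs u [] = [] := rfl

lemma pvTs_cons (u : Int) (e : Int × Int) (l : List (Int × Int)) :
    pvTs u (e :: l) = if e.1 = u then e.2 :: pvTs u l else pvTs u l := by
  simp [pvTs, List.filter_cons]
  split_ifs <;> simp_all

lemma sum_map_update {U : List Int} (hU : U.Nodup) {u0 : Int} (hu : u0 ∈ U)
    (f g : Int → Int) (c : Int)
    (hne : ∀ u ∈ U, u ≠ u0 → f u = g u) (h0 : f u0 = c + g u0) :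
    (U.map f).sum = c + (U.map g).sum := by
  induction U with
  | nil => cases hu
  | cons x rest ih =>
    rcases List.nodup_cons.mp hU with ⟨hx, hrest⟩
    rcases List.mem_cons.mp hu with h | h
    · subst h
      have : rest.map f = rest.map g := by
        apply List.map_congr_left
        intro u hu'
        exact hne u (List.mem_cons_of_mem _ hu') (fun he => hx (he ▸ hu'))
      simp [this, h0]; ring
    · have hxne : x ≠ u0 := fun he => hx (he ▸ h)
      have := ih hrest h (fun u hu' hne' => hne u (List.mem_cons_of_mem _ hu') hne')
      simp [this, hne x (List.mem_cons_self) hxne]; ring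

/-- B's sweep, decomposed per user over any covering list of distinct uids. -/
lemma sweep_eq (timeout : Int) (U : List Int) (hU : U.Nodup) :
    ∀ (l : List (Int × Int)) (m : PySem.Dict Int Int) (tot : Int),
      (∀ p ∈ l, p.1 ∈ U) →
      (l.foldl
        (fun st e =>
          (match st.2.get? e.1 with
            | none => st.1 + 1
            | some p => if e.2 - p > timeout then st.1 + 1 else st.1,
           st.2.insert e.1 e.2))
        (tot, m)).1
      = tot + (U.map (fun u => pvCnt timeout (m.get? u) (pvTs u l))).sum := by
  intro l
  induction l with
  | nil =>
    intro m tot _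
    simp [pvTs_nil, pvCnt]
  | cons e l ih =>
    intro m tot hcov
    obtain ⟨u0, t0⟩ := e
    have hu0 : u0 ∈ U := hcov (u0, t0) (List.mem_cons_self)
    set c : Int := (match m.get? u0 with
      | none => (1 : Int)
      | some p => if t0 - p > timeout then 1 else 0) with hc
    have hstep : (match m.get? u0 with
        | none => tot + 1
        | some p => if t0 - p > timeout then tot + 1 else tot) = tot + c := by
      rw [hc]; rcases m.get? u0 with _ | p
      · simp
      · simp; split_ifs <;> simp
    have hsum : (U.map (fun u => pvCnt timeout (m.get? u) (pvTs u ((u0, t0) :: l)))).sum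
        = c + (U.map (fun u => pvCnt timeout ((m.insert u0 t0).get? u) (pvTs u l))).sum := by
      apply sum_map_update hU hu0 _ _ c
      · intro u _ hne
        rw [pvTs_cons, PySem.Dict.get?_insert]
        simp [hne, Ne.symm hne]
      · rw [pvTs_cons, PySem.Dict.get?_insert]
        simp only []
        rw [hc]; rcases m.get? u0 with _ | p
        · simp [pvCnt]
        · simp [pvCnt]
    rw [List.foldl_cons]
    simp only []
    rw [hstep] at *
    calc (l.foldl _ (tot + c, m.insert u0 t0)).1
        = (tot + c) + (U.map (fun u => pvCnt timeout ((m.insert u0 t0).get? u) (pvTs u l))).sum := by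
          exact ih (m.insert u0 t0) (tot + c) (fun p hp => hcov p (List.mem_cons_of_mem _ hp))
      _ = tot + (U.map (fun u => pvCnt timeout (m.get? u) (pvTs u ((u0, t0) :: l)))).sum := by
          rw [hsum]; ring

/-- A's inner gap-counting fold equals pvCnt with a previous timestamp. -/
lemma inner_eq (timeout : Int) :
    ∀ (ts : List Int) (p acc : Int),
      ((p :: ts).zip ts).foldl
        (fun sessions pc => if pc.2 - pc.1 > timeout then sessions + 1 else sessions) acc
      = acc + pvCnt timeout (some p) ts := by
  intro ts
  induction ts with
  | nil => intro p acc; simp [pvCnt]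
  | cons t ts ih =>
    intro p acc
    simp only [List.zip_cons_cons, List.foldl_cons]
    rw [ih t]
    simp only [pvCnt]
    split_ifs <;> ring

/-- A's per-user body equals pvCnt from scratch. -/
lemma body_eq (timeout : Int) (ts : List Int) (tot : Int) :
    (let times := PySem.List.sorted ts (fun x => x) false
     if times = [] then tot
     else
       tot + (times.zip (PySem.List.slice times (some 1) none)).foldl
         (fun sessions pc => if pc.2 - pc.1 > timeout then sessions + 1 else sessions) 1)
    = tot + pvCnt timeout none (PySem.List.sorted ts (fun x => x) false) := by
  cases h : PySem.List.sorted ts (fun x => x) false with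
  | nil => simp [pvCnt]
  | cons t rest =>
    have hs : PySem.List.slice (t :: rest) (some 1) none = rest := by
      rw [PySem.List.slice_from]
      · simp
      · norm_num
    simp only [hs]
    rw [inner_eq]
    simp [pvCnt]

/-- A's outer fold over the grouped values as a sum. -/
lemma outer_eq (timeout : Int) :
    ∀ (vs : List (List Int)) (acc : Int),
      vs.foldl
        (fun total_sessions times =>
          let times := PySem.List.sorted times (fun x => x) false
          if times = [] then total_sessions
          else
            total_sessions +
              (times.zip (PySem.List.slice times (some 1) none)).foldl
                (fun sessions pc => if pc.2 - pc.1 > timeout then sessions + 1 else sessions) 1)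
        acc
      = acc + (vs.map (fun ts => pvCnt timeout none (PySem.List.sorted ts (fun x => x) false))).sum := by
  intro vs
  induction vs with
  | nil => intro acc; simp
  | cons ts vs ih =>
    intro acc
    rw [List.foldl_cons, body_eq timeout ts acc, ih]
    simp; ring

/-- The per-user subsequence of the globally ts-sorted event list is that user's sorted timestamps. -/
lemma pvTs_sorted (u : Int) (l : List (Int × Int)) :
    pvTs u (PySem.List.sorted l (fun e => e.2) false)
      = PySem.List.sorted (pvTs u l) (fun x => x) false := by
  symm
  apply PySem.List.sorted_id_eq_of_perm_of_pairwise
  · exact ((PySem.List.sorted_perm l (fun e => e.2) false).filter _).map _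
  · have hp : (PySem.List.sorted l (fun e => e.2) false).Pairwise
        (fun a b => (fun e : Int × Int => e.2) a ≤ (fun e : Int × Int => e.2) b) :=
      PySem.List.sorted_pairwise l _
    exact (hp.filter _).map _ (fun a b h => h)

-- ===== VERDICT (by name: the statement is the Claim_ definition above) =====
theorem getSessionCount_spec : Claim_equal_getSessionCount := by
  intro timeout userIds timestamps _
  unfold Spec_getSessionCount getSessionCount getSessionCount_alt
  set ev := userIds.zip timestamps with hev
  set sev := PySem.List.sorted ev (fun e => e.2) false with hsev
  -- B side
  rw [sweep_eq timeout (PySem.List.dedup (sev.map Prod.fst)) (PySem.List.nodup_dedup _)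
      sev PySem.Dict.empty 0
      (fun p hp => (PySem.List.mem_dedup _ _).mpr (List.mem_map_of_mem hp))]
  -- A side
  rw [outer_eq]
  set d := ev.foldl (fun d p => d.modify p.1 [] (· ++ [p.2]))
      (PySem.Dict.empty : PySem.Dict Int (List Int)) with hd
  have hnodup : d.keys.Nodup := by
    rw [hd]
    exact PySem.Dict.nodup_keys_foldl_modify_key ev Prod.fst [] _ _ PySem.Dict.nodup_keys_empty
  have hvals : d.values = d.keys.map (fun u => d.getD u []) :=
    PySem.Dict.values_eq_map_keys d hnodup []
  have hgetD : ∀ u, d.getD u [] = pvTs u ev := by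
    intro u
    rw [hd, PySem.Dict.getD_foldl_modify_append, PySem.Dict.getD_empty]
    rfl
  have hkeys : ∀ u, u ∈ d.keys ↔ u ∈ PySem.List.dedup (sev.map Prod.fst) := by
    intro u
    rw [hd, PySem.Dict.keys_foldl_modify_key, PySem.Dict.keys_empty,
        PySem.Set.update_nil_left, PySem.List.mem_dedup,
        PySem.Set.mem_ofList, hsev]
    constructor
    · intro h
      exact ((PySem.List.sorted_perm ev (fun e => e.2) false).map Prod.fst).mem_iff.mpr h
    · intro h
      exact ((PySem.List.sorted_perm ev (fun e => e.2) false).map Prod.fst).mem_iff.mp h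
  have hperm : d.keys.Perm (PySem.List.dedup (sev.map Prod.fst)) :=
    (List.perm_ext_iff_of_nodup hnodup (PySem.List.nodup_dedup _)).mpr hkeys
  rw [hvals, List.map_map]
  have hfun : ∀ u, ((fun ts => pvCnt timeout none (PySem.List.sorted ts (fun x => x) false)) ∘
      (fun u => d.getD u [])) u
      = pvCnt timeout (PySem.Dict.get? PySem.Dict.empty u) (pvTs u sev) := by
    intro u
    simp only [Function.comp, hgetD, PySem.Dict.get?_empty]
    rw [hsev, pvTs_sorted]
  rw [List.map_congr_left (fun u _ => hfun u)]
  rw [(hperm.map _).sum_eq]
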